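-- pv_equiv track=rewrite | github.com/dKustura/advent-of-code-2025 | day-4/day4.py | find_removable
-- ===== SOURCE A (Python) =====
-- from typing import List
--
-- ROLL = '@'
--
-- DIRECTIONS = [-1, 0, 1]
--
-- THRESHOLD = 4
--
-- def find_removable(grid: List[List[str]]):
--     N = len(grid)
--     M = len(grid[0])
--
--     def check(i, j):
--             if grid[i][j] != ROLL:
--                 return False
--
--             adj_rolls = 0
--
--             for dr in DIRECTIONS:
--                 for dc in DIRECTIONS:
--                     r = i + dr
--                     c = j + dc
--
--                     if 0 <= r < N and 0 <= c < M and (dr != 0 or dc != 0):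
--                         if grid[r][c] == ROLL:
--                             adj_rolls += 1
--                             if adj_rolls >= THRESHOLD:
--                                 return False
--
--             return True
--
--     result = set()
--
--     for i in range(N):
--         for j in range(M):
--             if check(i, j):
--                 result.add((i, j))
--
--     return result
-- ===== SOURCE B (Python) =====
-- from typing import List
--
-- ROLL = '@'
--
-- DIRECTIONS = [-1, 0, 1]
--
-- THRESHOLD = 4
--
-- def find_removable(grid: List[List[str]]):
--     # Scatter pass: each roll cell adds 1 to a counter at every in-bounds
--     # neighbour position; second pass reads the table instead of re-scanning.
--     N = len(grid)
--     M = len(grid[0])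
--
--     counts = {}
--     for i in range(N):
--         for j in range(M):
--             if grid[i][j] == ROLL:
--                 for dr in DIRECTIONS:
--                     for dc in DIRECTIONS:
--                         if dr != 0 or dc != 0:
--                             r = i + dr
--                             c = j + dc
--                             if 0 <= r < N and 0 <= c < M:
--                                 counts[(r, c)] = counts.get((r, c), 0) + 1
--
--     return {(i, j) for i in range(N) for j in range(M)
--             if grid[i][j] == ROLL and counts.get((i, j), 0) < THRESHOLD}
-- ===== Notes on version B (the rewrite author's own statement) =====
-- stated objective: alternative
-- what changed: A re-scans the 8 neighbours of every cell inside a per-cell check with an early exit; B inverts the traversal: one scatter pass accumulates, for every roll cell, +1 into a counter dict at each in-bounds neighbour position, and a second pass just looks each roll cell's accumulated count up in the table.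
import Mathlib
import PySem

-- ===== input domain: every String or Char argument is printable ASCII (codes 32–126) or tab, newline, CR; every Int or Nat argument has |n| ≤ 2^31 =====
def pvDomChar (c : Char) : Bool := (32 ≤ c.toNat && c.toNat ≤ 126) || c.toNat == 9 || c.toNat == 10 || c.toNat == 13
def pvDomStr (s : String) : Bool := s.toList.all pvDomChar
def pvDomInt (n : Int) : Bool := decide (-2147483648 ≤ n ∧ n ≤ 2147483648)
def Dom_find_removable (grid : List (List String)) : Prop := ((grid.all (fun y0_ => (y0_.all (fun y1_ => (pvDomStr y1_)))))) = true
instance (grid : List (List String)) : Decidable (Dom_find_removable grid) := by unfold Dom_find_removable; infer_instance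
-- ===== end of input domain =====

-- B replaces A's per-cell 8-neighbour re-scan with early exit by a scatter pass into a
-- counter dictionary followed by a table lookup pass (same return value; no mutation).

-- ===== PORT A =====
-- grid[i][j] (both ports read cells the same way; out-of-range only outside Pre_)
def pvCell (grid : List (List String)) (i j : Int) : String :=
  PySem.List.pyGetD (PySem.List.pyGetD grid i []) j ""

def pvDirections : List Int := [-1, 0, 1]

-- one step of check's inner loop body (state none = early 'return False' taken)
def pvStepA (grid : List (List String)) (N M i j : Int) (st : Option Int) (dr dc : Int) :
    Option Int :=
  match st with
  | none => none
  | some adj =>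
    if 0 ≤ i + dr ∧ i + dr < N ∧ 0 ≤ j + dc ∧ j + dc < M ∧ (dr ≠ 0 ∨ dc ≠ 0) then
      if pvCell grid (i + dr) (j + dc) = "@" then
        if adj + 1 ≥ 4 then none else some (adj + 1)
      else some adj
    else some adj

-- A's nested helper check(i, j)
def pvCheckA (grid : List (List String)) (N M i j : Int) : Bool :=
  if pvCell grid i j ≠ "@" then false
  else
    match pvDirections.foldl
        (fun st dr => pvDirections.foldl (fun st dc => pvStepA grid N M i j st dr dc) st)
        (some 0) with
    | none => false
    | some _ => true

def find_removable (grid : List (List String)) : List (Int × Int) :=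
  let N : Int := grid.length
  let M : Int := (PySem.List.pyGetD grid 0 []).length
  (PySem.List.pyRange 0 N 1).foldl (fun res i =>
    (PySem.List.pyRange 0 M 1).foldl (fun res j =>
      if pvCheckA grid N M i j then PySem.Set.add res (i, j) else res) res)
    PySem.Set.empty

-- ===== PORT B =====
-- counts[(r, c)] = counts.get((r, c), 0) + 1
def pvIns (d : PySem.Dict (Int × Int) Int) (k : Int × Int) : PySem.Dict (Int × Int) Int :=
  d.insert k (d.getD k 0 + 1)

-- first pass of B: each roll cell adds 1 at every in-bounds neighbour position
def pvScatter (grid : List (List String)) (N M : Int) : PySem.Dict (Int × Int) Int :=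
  (PySem.List.pyRange 0 N 1).foldl (fun d i =>
    (PySem.List.pyRange 0 M 1).foldl (fun d j =>
      if pvCell grid i j = "@" then
        pvDirections.foldl (fun d dr =>
          pvDirections.foldl (fun d dc =>
            if dr ≠ 0 ∨ dc ≠ 0 then
              if 0 ≤ i + dr ∧ i + dr < N ∧ 0 ≤ j + dc ∧ j + dc < M then
                pvIns d (i + dr, j + dc)
              else d
            else d) d) d
      else d) d)
    PySem.Dict.empty

def find_removable_alt (grid : List (List String)) : List (Int × Int) :=
  let N : Int := grid.length
  let M : Int := (PySem.List.pyGetD grid 0 []).length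
  let counts := pvScatter grid N M
  (PySem.List.pyRange 0 N 1).foldl (fun res i =>
    (PySem.List.pyRange 0 M 1).foldl (fun res j =>
      if pvCell grid i j = "@" ∧ counts.getD (i, j) 0 < 4 then PySem.Set.add res (i, j)
      else res) res)
    PySem.Set.empty

-- ===== PRECONDITION & SPEC =====
-- Pre_ excludes exactly the inputs where the Python raises IndexError: the empty grid
-- (grid[0]) and grids with a row shorter than the first row (grid[i][j], j < M).
def Pre_find_removable (grid : List (List String)) : Prop :=
  grid ≠ [] ∧ ∀ row ∈ grid, (grid.headD []).length ≤ row.length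
instance (grid : List (List String)) : Decidable (Pre_find_removable grid) := by
  unfold Pre_find_removable; infer_instance

def pvWitness_find_removable : List (List String) := [["@", "."], [".", "@"]]

def Spec_find_removable (grid : List (List String)) (out : List (Int × Int)) : Prop :=
  out = find_removable_alt grid
instance (grid : List (List String)) (out : List (Int × Int)) :
    Decidable (Spec_find_removable grid out) := by unfold Spec_find_removable; infer_instance

-- ===== CLAIM (what is proved, stated in full; the proofs are below) =====
def Claim_equal_find_removable : Prop :=
  ∀ (grid : List (List String)), Dom_find_removable grid → Pre_find_removable grid →
    Spec_find_removable grid (find_removable grid)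

-- ===== LEMMAS AND PROOFS =====

-- the 9 (dr, dc) offsets in A's loop order
def pvOffs : List (Int × Int) :=
  [(-1, -1), (-1, 0), (-1, 1), (0, -1), (0, 0), (0, 1), (1, -1), (1, 0), (1, 1)]

-- offset d contributes to the neighbour count of (i, j)
def pvFlag (grid : List (List String)) (N M i j : Int) (d : Int × Int) : Bool :=
  decide (0 ≤ i + d.1 ∧ i + d.1 < N ∧ 0 ≤ j + d.2 ∧ j + d.2 < M ∧ (d.1 ≠ 0 ∨ d.2 ≠ 0)) &&
    (pvCell grid (i + d.1) (j + d.2) == "@")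

-- the number of in-bounds roll neighbours of (i, j)
def pvCnt (grid : List (List String)) (N M i j : Int) : Nat :=
  pvOffs.countP (pvFlag grid N M i j)

-- A's loop body as a function of the contribution flag only
def pvFA (st : Option Int) (b : Bool) : Option Int :=
  match st with
  | none => none
  | some adj => if b then (if adj + 1 ≥ 4 then none else some (adj + 1)) else some adj

lemma pvStepA_eq (grid : List (List String)) (N M i j : Int) (st : Option Int) (dr dc : Int) :
    pvStepA grid N M i j st dr dc = pvFA st (pvFlag grid N M i j (dr, dc)) := by
  cases st with
  | none => rfl
  | some adj =>
    simp only [pvStepA, pvFA, pvFlag]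
    by_cases hc : 0 ≤ i + dr ∧ i + dr < N ∧ 0 ≤ j + dc ∧ j + dc < M ∧ (dr ≠ 0 ∨ dc ≠ 0)
    · by_cases hr : pvCell grid (i + dr) (j + dc) = "@" <;> simp [hc, hr]
    · simp [hc]

lemma pvFoldl_pvFA_none (bs : List Bool) : bs.foldl pvFA none = none := by
  induction bs with
  | nil => rfl
  | cons b t ih => simpa [pvFA] using ih

lemma pvFoldl_pvFA (bs : List Bool) (a : Int) (ha : a < 4) :
    bs.foldl pvFA (some a) =
      if 4 ≤ a + (bs.countP id : Int) then none else some (a + (bs.countP id : Int)) := by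
  induction bs generalizing a with
  | nil => simp; omega
  | cons b t ih =>
    cases b with
    | false =>
      have hstep : pvFA (some a) false = some a := by simp [pvFA]
      rw [List.foldl_cons, hstep, ih a ha]
      simp
    | true =>
      have hstep : pvFA (some a) true =
          if a + 1 ≥ 4 then none else some (a + 1) := by simp [pvFA]
      rw [List.foldl_cons, hstep]
      by_cases h4 : a + 1 ≥ 4
      · rw [if_pos h4, pvFoldl_pvFA_none]
        rw [if_pos (by simp; omega)]
      · rw [if_neg h4, ih (a + 1) (by omega)]
        have hc : (List.countP id (true :: t) : Int) = (t.countP id : Int) + 1 := by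
          simp
        rw [hc]
        split_ifs with h1 h2 h2 <;> first | rfl | (congr 1; omega)

lemma pvCheckA_eq (grid : List (List String)) (N M i j : Int) :
    pvCheckA grid N M i j =
      ((pvCell grid i j == "@") && decide ((pvCnt grid N M i j : Int) < 4)) := by
  by_cases hr : pvCell grid i j = "@"
  · have h := pvFoldl_pvFA (pvOffs.map (pvFlag grid N M i j)) 0 (by omega)
    simp only [pvOffs, List.map_cons, List.map_nil, List.foldl_cons, List.foldl_nil] at h
    simp only [pvCheckA, if_neg (not_not_intro hr), pvDirections, List.foldl_cons,
      List.foldl_nil, pvStepA_eq]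
    rw [h]
    have hc : (pvOffs.map (pvFlag grid N M i j)).countP id = pvCnt grid N M i j := by
      simp [List.countP_map, pvCnt]
    simp only [pvOffs, List.map_cons, List.map_nil] at hc
    rw [hc]
    by_cases h4 : 4 ≤ 0 + (pvCnt grid N M i j : Int)
    · rw [if_pos h4]; simp [hr]; omega
    · rw [if_neg h4]; simp [hr]; omega
  · simp [pvCheckA, hr]

-- ----- B side -----

-- condition under which B's scatter loop touches position (a + d.1, b + d.2)
def pvQb (N M a b : Int) (d : Int × Int) : Bool :=
  decide ((d.1 ≠ 0 ∨ d.2 ≠ 0) ∧ 0 ≤ a + d.1 ∧ a + d.1 < N ∧ 0 ≤ b + d.2 ∧ b + d.2 < M)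

-- the positions one roll cell (a, b) increments, in loop order
def pvTgt (N M a b : Int) : List (Int × Int) :=
  pvOffs.filterMap (fun d => if pvQb N M a b d then some (a + d.1, b + d.2) else none)

-- row-major list of all grid positions
def pvCells (N M : Int) : List (Int × Int) :=
  (PySem.List.pyRange 0 N 1).flatMap (fun a => (PySem.List.pyRange 0 M 1).map (fun b => (a, b)))

-- the whole multiset of increments performed by B's first pass
def pvBigL (grid : List (List String)) (N M : Int) : List (Int × Int) :=
  (pvCells N M).flatMap (fun p => if pvCell grid p.1 p.2 = "@" then pvTgt N M p.1 p.2 else [])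

lemma pvFoldl_if_filterMap {α κ δ : Type} (l : List α) (p : α → Bool) (t : α → κ)
    (g : δ → κ → δ) (d : δ) :
    l.foldl (fun d x => if p x then g d (t x) else d) d =
      (l.filterMap (fun x => if p x then some (t x) else none)).foldl g d := by
  induction l generalizing d with
  | nil => rfl
  | cons x xs ih => by_cases hp : p x <;> simp [hp, ih]

lemma pvIfPair (N M i j dr dc : Int) (d : PySem.Dict (Int × Int) Int) :
    (if dr ≠ 0 ∨ dc ≠ 0 then
        if 0 ≤ i + dr ∧ i + dr < N ∧ 0 ≤ j + dc ∧ j + dc < M then pvIns d (i + dr, j + dc)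
        else d
      else d) =
      if pvQb N M i j (dr, dc) then pvIns d (i + dr, j + dc) else d := by
  by_cases h1 : dr ≠ 0 ∨ dc ≠ 0
  · by_cases h2 : 0 ≤ i + dr ∧ i + dr < N ∧ 0 ≤ j + dc ∧ j + dc < M <;>
      simp [pvQb, h1, h2]
  · simp [pvQb, h1]

lemma pvScatterCell_eq (N M i j : Int) (d0 : PySem.Dict (Int × Int) Int) :
    pvDirections.foldl (fun d dr =>
        pvDirections.foldl (fun d dc =>
          if dr ≠ 0 ∨ dc ≠ 0 then
            if 0 ≤ i + dr ∧ i + dr < N ∧ 0 ≤ j + dc ∧ j + dc < M then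
              pvIns d (i + dr, j + dc)
            else d
          else d) d) d0 =
      (pvTgt N M i j).foldl pvIns d0 := by
  rw [pvTgt, ← pvFoldl_if_filterMap pvOffs (pvQb N M i j) (fun d => (i + d.1, j + d.2)) pvIns d0]
  simp only [pvDirections, pvOffs, List.foldl_cons, List.foldl_nil, pvIfPair]

lemma pvScatter_eq (grid : List (List String)) (N M : Int) :
    pvScatter grid N M = (pvBigL grid N M).foldl pvIns PySem.Dict.empty := by
  unfold pvScatter pvBigL pvCells
  rw [List.foldl_flatMap, List.foldl_flatMap]
  congr 1
  funext d i
  rw [List.foldl_map]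
  congr 1
  funext d j
  by_cases hr : pvCell grid i j = "@"
  · simp only [hr, if_pos]
    simp [pvScatterCell_eq]
  · simp [hr]

lemma pvGetD_scatter (grid : List (List String)) (N M : Int) (v : Int × Int) :
    (pvScatter grid N M).getD v 0 = ((pvBigL grid N M).count v : Int) := by
  rw [pvScatter_eq]
  have hf : pvIns = fun (d : PySem.Dict (Int × Int) Int) (x : Int × Int) =>
      d.insert x (d.getD x 0 + 1) := rfl
  rw [hf, PySem.Dict.getD_foldl_insert_add_one]
  simp

lemma pvSum_countP_comm {α β : Type} (l1 : List α) (l2 : List β) (q : α → β → Bool) :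
    (l1.map (fun x => l2.countP (q x))).sum = (l2.map (fun y => l1.countP (fun x => q x y))).sum := by
  induction l1 with
  | nil => simp
  | cons x xs ih =>
    simp only [List.map_cons, List.sum_cons, List.countP_cons, ih]
    rw [show (fun y => xs.countP (fun x => q x y) + if q x y then 1 else 0) =
        (fun y => xs.countP (fun x => q x y) + (if q x y then 1 else 0)) from rfl]
    rw [List.sum_map_add]
    rw [PySem.List.sum_map_ite_one_zero_nat (q x) l2]
    omega

lemma pvCountP_and_eq {α : Type} [BEq α] [LawfulBEq α] (l : List α) (g : α → Bool) (s : α) :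
    l.countP (fun x => g x && (x == s)) = if g s then l.count s else 0 := by
  induction l with
  | nil => simp
  | cons x xs ih =>
    by_cases hx : x = s
    · subst hx
      simp only [List.countP_cons, List.count_cons, ih]
      cases hg : g x <;> simp
    · simp only [List.countP_cons, List.count_cons, ih]
      simp [hx]

lemma pvCount_pyRange (a : Int) (b : Int) (x : Int) :
    (PySem.List.pyRange a b 1).count x = if a ≤ x ∧ x < b then 1 else 0 := by
  by_cases hm : a ≤ x ∧ x < b
  · rw [if_pos hm]
    exact List.count_eq_one_of_mem (PySem.List.nodup_pyRange_one a b)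
      (PySem.List.mem_pyRange_one.mpr hm)
  · rw [if_neg hm]
    exact List.count_eq_zero_of_not_mem (fun h => hm (PySem.List.mem_pyRange_one.mp h))

lemma pvSum_ite_mem (l : List Int) (hl : l.Nodup) (x : Int) (c : Nat) :
    (l.map (fun a => if a = x then c else 0)).sum = if x ∈ l then c else 0 := by
  induction l with
  | nil => simp
  | cons a t ih =>
    obtain ⟨ha, ht⟩ := List.nodup_cons.mp hl
    simp only [List.map_cons, List.sum_cons, List.mem_cons, ih ht]
    by_cases hax : a = x
    · subst hax
      simp [ha]
    · by_cases hxt : x ∈ t <;>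
        simp [hxt, (Ne.symm hax : x ≠ a)] <;> exact fun h => absurd h hax

lemma pvCount_row (M : Int) (a s1 s2 : Int) :
    ((PySem.List.pyRange 0 M 1).map (fun b => (a, b))).count (s1, s2) =
      if a = s1 then (PySem.List.pyRange 0 M 1).count s2 else 0 := by
  by_cases ha : a = s1
  · subst ha
    rw [if_pos rfl]
    exact List.count_map_of_injective _ _ (fun x y h => by simpa using h) _
  · rw [if_neg ha, List.count_eq_zero]
    intro h
    obtain ⟨b, _, hb⟩ := List.mem_map.mp h
    exact ha (congrArg Prod.fst hb)

lemma pvCount_cells (N M : Int) (s : Int × Int) :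
    (pvCells N M).count s = if 0 ≤ s.1 ∧ s.1 < N ∧ 0 ≤ s.2 ∧ s.2 < M then 1 else 0 := by
  obtain ⟨s1, s2⟩ := s
  unfold pvCells
  rw [List.count_eq_countP, List.countP_flatMap]
  simp only [Function.comp_def]
  have h1 : ∀ a, ((PySem.List.pyRange 0 M 1).map (fun b => (a, b))).countP (· == (s1, s2)) =
      if a = s1 then (PySem.List.pyRange 0 M 1).count s2 else 0 := by
    intro a
    rw [← List.count_eq_countP]
    exact pvCount_row M a s1 s2
  rw [List.map_eq_map_iff.mpr (fun a _ => h1 a)]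
  rw [pvSum_ite_mem _ (PySem.List.nodup_pyRange_one 0 N) s1 _]
  rw [pvCount_pyRange 0 M s2]
  have hm := PySem.List.mem_pyRange_one (x := s1) (a := 0) (b := N)
  by_cases h1m : s1 ∈ PySem.List.pyRange 0 N 1 <;> by_cases h2m : 0 ≤ s2 ∧ s2 < M <;>
    · rw [hm] at h1m
      simp only [h1m, h2m]
      split_ifs <;> simp_all

lemma pvCountP_filterMap_if {α β : Type} (l : List α) (c : α → Bool) (t : α → β)
    (p : β → Bool) :
    (l.filterMap (fun x => if c x then some (t x) else none)).countP p =
      l.countP (fun x => c x && p (t x)) := by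
  induction l with
  | nil => rfl
  | cons x xs ih => by_cases hc : c x <;> simp [hc, ih, List.countP_cons]

lemma pvCount_bigL (grid : List (List String)) (N M i j : Int)
    (hi : 0 ≤ i) (hi' : i < N) (hj : 0 ≤ j) (hj' : j < M) :
    (pvBigL grid N M).count (i, j) = pvCnt grid N M i j := by
  classical
  -- q p d : cell p is a roll and its scatter step at offset d increments position (i, j)
  set q : (Int × Int) → (Int × Int) → Bool := fun p d =>
    (decide (pvCell grid p.1 p.2 = "@") && pvQb N M p.1 p.2 d) &&
      (p == (i - d.1, j - d.2)) with hq
  have h1 : ∀ p : Int × Int,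
      (if pvCell grid p.1 p.2 = "@" then pvTgt N M p.1 p.2 else []).countP (· == (i, j)) =
        pvOffs.countP (q p) := by
    intro p
    by_cases hr : pvCell grid p.1 p.2 = "@"
    · rw [if_pos hr]
      unfold pvTgt
      rw [pvCountP_filterMap_if]
      refine (List.Perm.refl pvOffs).countP_congr (fun d _ => ?_)
      have he : ((p.1 + d.1, p.2 + d.2) == ((i, j) : Int × Int)) =
          (p == ((i - d.1, j - d.2) : Int × Int)) := by
        apply Bool.coe_iff_coe.mp
        obtain ⟨a, b⟩ := p
        simp only [beq_iff_eq, Prod.ext_iff]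
        constructor <;> intro ⟨h1, h2⟩ <;> constructor <;> omega
      rw [he, hq]
      simp only [decide_eq_true hr, Bool.true_and]
    · rw [if_neg hr]
      simp only [List.countP_nil, hq, decide_eq_false hr, Bool.false_and]
      rw [eq_comm]
      apply List.countP_eq_zero.mpr
      intro d _
      simp
  unfold pvBigL
  rw [List.count_eq_countP, List.countP_flatMap]
  simp only [Function.comp_def]
  rw [List.map_eq_map_iff.mpr (fun p _ => h1 p)]
  rw [pvSum_countP_comm]
  have h2 : ∀ d : Int × Int, d ∈ pvOffs →
      (pvCells N M).countP (fun p => q p d) =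
        if pvFlag grid N M i j (-d.1, -d.2) then 1 else 0 := by
    intro d _
    have hstep := pvCountP_and_eq (pvCells N M)
      (fun p => decide (pvCell grid p.1 p.2 = "@") && pvQb N M p.1 p.2 d)
      ((i - d.1, j - d.2))
    rw [hq]
    beta_reduce
    rw [hstep, pvCount_cells]
    have e1 : i - d.1 + d.1 = i := by ring
    have e2 : j - d.2 + d.2 = j := by ring
    have e3 : i + -d.1 = i - d.1 := by ring
    have e4 : j + -d.2 = j - d.2 := by ring
    simp only [pvQb, pvFlag, e1, e2, e3, e4]
    by_cases hcell : pvCell grid (i - d.1) (j - d.2) = "@" <;>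
      by_cases hnz : d.1 ≠ 0 ∨ d.2 ≠ 0 <;>
        by_cases hin : 0 ≤ i - d.1 ∧ i - d.1 < N ∧ 0 ≤ j - d.2 ∧ j - d.2 < M <;>
            simp [hcell, hnz, hin, hi, hi', hj, hj']
  rw [List.map_eq_map_iff.mpr h2]
  rw [PySem.List.sum_map_ite_one_zero_nat (fun d : Int × Int => pvFlag grid N M i j (-d.1, -d.2)) pvOffs]
  have h3 : pvOffs.countP (fun d : Int × Int => pvFlag grid N M i j (-d.1, -d.2)) =
      (pvOffs.map (fun d : Int × Int => (-d.1, -d.2))).countP (pvFlag grid N M i j) := by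
    rw [List.countP_map]; rfl
  have hperm : (pvOffs.map (fun d : Int × Int => (-d.1, -d.2))).Perm pvOffs := by decide
  rw [h3, hperm.countP_congr (fun x _ => rfl)]
  rfl

-- the two result loops agree cell by cell
lemma pvCond_eq (grid : List (List String)) (N M i j : Int)
    (hi : 0 ≤ i) (hi' : i < N) (hj : 0 ≤ j) (hj' : j < M) :
    (pvCheckA grid N M i j = true) ↔
      (pvCell grid i j = "@" ∧ (pvScatter grid N M).getD (i, j) 0 < 4) := by
  rw [pvCheckA_eq, pvGetD_scatter, pvCount_bigL grid N M i j hi hi' hj hj']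
  simp

-- ===== VERDICT (by name: the statement is the Claim_ definition above) =====
theorem find_removable_spec : Claim_equal_find_removable := by
  intro grid _ _
  unfold Spec_find_removable find_removable find_removable_alt
  apply PySem.List.foldl_congr_mem
  intro acc i hi
  apply PySem.List.foldl_congr_mem
  intro acc2 j hj
  obtain ⟨hi0, hi1⟩ := PySem.List.mem_pyRange_one.mp hi
  obtain ⟨hj0, hj1⟩ := PySem.List.mem_pyRange_one.mp hj
  have h := pvCond_eq grid (grid.length) ((PySem.List.pyGetD grid 0 []).length) i j hi0 hi1 hj0 hj1
  by_cases hc : pvCheckA grid (grid.length) ((PySem.List.pyGetD grid 0 []).length) i j = true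
  · rw [if_pos hc, if_pos (h.mp hc)]
  · rw [if_neg hc, if_neg (fun hp => hc (h.mpr hp))]
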